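-- pv_equiv track=rewrite | github.com/K4sum1/pyside2-xp | tools/create_changelog.py | extract_change_log
-- ===== SOURCE A (Python) =====
-- from typing import Dict, List, Tuple
--
-- def extract_change_log(commit_message: List[str]) -> Tuple[str, List[str]]:
--     """Extract a tuple of (component, change log lines) from a commit message
--        of the form [ChangeLog][shiboken2] description..."""
--     result = []
--     component = 'pyside'
--     within_changelog = False
--     task_nr = ''
--     for line in commit_message:
--         if within_changelog:
--             if line:
--                 result.append('   ' + line.strip())
--             else:
--                 within_changelog = False
--         else:
--             if line.startswith('[ChangeLog]'):
--                 log_line = line[11:]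
--                 if log_line.startswith('['):
--                     end = log_line.find(']')
--                     if end > 0:
--                         component = log_line[1:end]
--                         log_line = log_line[end + 1:]
--                 result.append(log_line.strip())
--                 within_changelog = True
--             elif line.startswith("Fixes: ") or line.startswith("Task-number: "):
--                 task_nr = line.split(":")[1].strip()
--     if result:
--         first_line = ' - '
--         if task_nr:
--             first_line += "[{}] ".format(task_nr)
--         first_line += result[0]
--         result[0] = first_line
--     return (component, result)
-- ===== SOURCE B (Python) =====
-- def extract_change_log(commit_message):
--     """Two-stage version: first split the message into blank-separated paragraphs,
--     then interpret each paragraph independently (no cross-line mode flag)."""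
--     # stage 1: group lines into paragraphs; blank lines are separators
--     paragraphs = []
--     current = []
--     for line in commit_message:
--         if line:
--             current.append(line)
--         else:
--             paragraphs.append(current)
--             current = []
--     paragraphs.append(current)
--
--     # stage 2: interpret each paragraph
--     component = 'pyside'
--     task_nr = ''
--     result = []
--     for para in paragraphs:
--         head = next((i for i, l in enumerate(para) if l.startswith('[ChangeLog]')), None)
--         for l in (para if head is None else para[:head]):
--             if l.startswith('Fixes: ') or l.startswith('Task-number: '):
--                 task_nr = l.split(':')[1].strip()
--         if head is not None:
--             log_line = para[head][11:]
--             if log_line.startswith('['):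
--                 end = log_line.find(']')
--                 if end > 0:
--                     component = log_line[1:end]
--                     log_line = log_line[end + 1:]
--             result.append(log_line.strip())
--             result.extend('   ' + l.strip() for l in para[head + 1:])
--     if result:
--         first_line = ' - '
--         if task_nr:
--             first_line += '[{}] '.format(task_nr)
--         result[0] = first_line + result[0]
--     return (component, result)
-- ===== Notes on version B (the rewrite author's own statement) =====
-- stated objective: alternative
-- what changed: Replaces A's single-pass boolean-flag state machine with a two-stage pipeline: first group the lines into blank-separated paragraphs, then interpret each paragraph on its own by locating its first '[ChangeLog]' header, scanning the lines before it for Fixes/Task-number and turning the lines after it into continuation entries.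
import Mathlib
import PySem

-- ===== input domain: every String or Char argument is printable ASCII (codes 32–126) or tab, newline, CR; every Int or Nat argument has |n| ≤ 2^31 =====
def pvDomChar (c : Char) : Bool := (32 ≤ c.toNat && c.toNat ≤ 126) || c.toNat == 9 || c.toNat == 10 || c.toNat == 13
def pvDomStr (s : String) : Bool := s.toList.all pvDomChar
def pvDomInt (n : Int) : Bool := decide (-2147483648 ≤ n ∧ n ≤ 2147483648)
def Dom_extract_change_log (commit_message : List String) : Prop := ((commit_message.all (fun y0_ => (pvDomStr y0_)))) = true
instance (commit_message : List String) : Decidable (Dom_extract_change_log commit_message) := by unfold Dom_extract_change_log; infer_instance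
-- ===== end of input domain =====

-- B replaces A's boolean-flag state machine with a two-stage pipeline: group the lines into
-- blank-separated paragraphs, then interpret each paragraph on its own; objective: alternative.

-- shared leaf helpers (this code is textually identical in both Pythons)
def pvContLine (line : String) : String := "   " ++ PySem.Str.strip line

-- line.split(":")[1].strip(); the guard guarantees a ':' so index 1 exists (getD default is unreachable)
def pvTaskNr (line : String) : String :=
  PySem.Str.strip (((PySem.Str.split? line ":").getD []).getD 1 "")

-- the [component] parse shared verbatim by both Pythons: returns (component, log_line)
def pvParseCL (line : String) (component : String) : String × String :=
  let log_line := PySem.Str.slice line (some 11) none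
  if PySem.Str.startswith log_line "[" then
    let e := PySem.Str.find log_line "]"
    if e > 0 then
      (PySem.Str.slice log_line (some 1) (some e), PySem.Str.slice log_line (some (e + 1)) none)
    else (component, log_line)
  else (component, log_line)

-- ===== PORT A =====
def aStep (st : List String × String × Bool × String) (line : String) :
    List String × String × Bool × String :=
  match st with
  | (result, component, within_changelog, task_nr) =>
    if within_changelog then
      if line ≠ "" then (result ++ [pvContLine line], component, true, task_nr)
      else (result, component, false, task_nr)
    else
      if PySem.Str.startswith line "[ChangeLog]" then
        let p := pvParseCL line component
        (result ++ [PySem.Str.strip p.2], p.1, true, task_nr)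
      else if PySem.Str.startswith line "Fixes: " || PySem.Str.startswith line "Task-number: " then
        (result, component, within_changelog, pvTaskNr line)
      else (result, component, within_changelog, task_nr)

def extract_change_log (commit_message : List String) : String × List String :=
  match commit_message.foldl aStep ([], "pyside", false, "") with
  | (result, component, _, task_nr) =>
    if result ≠ [] then
      let first_line := " - "
      let first_line := if task_nr ≠ "" then first_line ++ "[" ++ task_nr ++ "] " else first_line
      let first_line := first_line ++ result.headD ""
      (component, result.set 0 first_line)
    else (component, result)

-- ===== PORT B =====
-- stage 1 of Source B: one step of the paragraph-splitting loop
def pvSplitStep (st : List (List String) × List String) (line : String) :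
    List (List String) × List String :=
  if line ≠ "" then (st.1, st.2 ++ [line]) else (st.1 ++ [st.2], [])

def pvHeader (l : String) : Bool := PySem.Str.startswith l "[ChangeLog]"

-- the inner 'for l in …' of stage 2 updating task_nr
def pvFix (task_nr : String) (l : String) : String :=
  if PySem.Str.startswith l "Fixes: " || PySem.Str.startswith l "Task-number: " then pvTaskNr l
  else task_nr

-- stage 2 of Source B: interpret one paragraph; state (component, task_nr, result)
def pvParaStep (st : String × String × List String) (para : List String) :
    String × String × List String :=
  match para.findIdx? pvHeader with
  | none => (st.1, para.foldl pvFix st.2.1, st.2.2)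
  | some h =>
    let task_nr := (para.take h).foldl pvFix st.2.1
    let p := pvParseCL (para.getD h "") st.1
    (p.1, task_nr, st.2.2 ++ [PySem.Str.strip p.2] ++ (para.drop (h + 1)).map pvContLine)

def extract_change_log_alt (commit_message : List String) : String × List String :=
  let sp := commit_message.foldl pvSplitStep ([], [])
  let paragraphs := sp.1 ++ [sp.2]
  match paragraphs.foldl pvParaStep ("pyside", "", []) with
  | (component, task_nr, result) =>
    match result with
    | [] => (component, [])
    | r0 :: rt =>
      (component,
        ((" - " ++ (if task_nr ≠ "" then "[" ++ task_nr ++ "] " else "")) ++ r0) :: rt)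

-- ===== PRECONDITION & SPEC =====
def Spec_extract_change_log (commit_message : List String) (out : String × List String) : Prop := out = extract_change_log_alt commit_message
instance (commit_message : List String) (out : String × List String) : Decidable (Spec_extract_change_log commit_message out) := by unfold Spec_extract_change_log; infer_instance

-- ===== CLAIM (what is proved, stated in full; the proofs are below) =====
def Claim_equal_extract_change_log : Prop := ∀ (commit_message : List String), Dom_extract_change_log commit_message → Spec_extract_change_log commit_message (extract_change_log commit_message)

-- ===== LEMMAS AND PROOFS =====

-- prepend a partial current paragraph to the head paragraph
def pvConsHead (cur : List String) : List (List String) → List (List String)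
  | [] => [cur]
  | p :: ps => (cur ++ p) :: ps

-- recursive characterisation of the paragraph split
def pvParas : List String → List (List String)
  | [] => [[]]
  | l :: ms => if l = "" then [] :: pvParas ms else pvConsHead [l] (pvParas ms)

theorem pvParas_ne_nil : ∀ ms : List String, pvParas ms ≠ [] := by
  intro ms
  induction ms with
  | nil => simp [pvParas]
  | cons l ls ih =>
    by_cases h : l = "" <;> simp [pvParas, h]
    cases hp : pvParas ls <;> simp [pvConsHead]

theorem pvConsHead_nil (ms : List String) : pvConsHead [] (pvParas ms) = pvParas ms := by
  cases hp : pvParas ms with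
  | nil => exact absurd hp (pvParas_ne_nil ms)
  | cons p ps => simp [pvConsHead]

theorem pvConsHead_consHead (cur x : List String) (L : List (List String)) :
    pvConsHead cur (pvConsHead x L) = pvConsHead (cur ++ x) L := by
  cases L <;> simp [pvConsHead]

theorem pvSplit_acc : ∀ (ms : List String) (P : List (List String)) (cur : List String),
    (List.foldl pvSplitStep (P, cur) ms).1 ++ [(List.foldl pvSplitStep (P, cur) ms).2]
      = P ++ pvConsHead cur (pvParas ms) := by
  intro ms
  induction ms with
  | nil => intro P cur; simp [pvParas, pvConsHead]
  | cons l ls ih =>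
    intro P cur
    by_cases h : l = ""
    · subst h
      rw [List.foldl_cons, show pvSplitStep (P, cur) "" = (P ++ [cur], []) from by simp [pvSplitStep],
        ih, pvConsHead_nil]
      simp [pvParas, pvConsHead]
    · rw [List.foldl_cons, show pvSplitStep (P, cur) l = (P, cur ++ [l]) from by simp [pvSplitStep, h],
        ih]
      simp [pvParas, h, pvConsHead_consHead]

theorem pvParaStep_nil (st : String × String × List String) : pvParaStep st [] = st := by
  simp [pvParaStep, List.findIdx?_nil]

theorem pvParaStep_cons (l : String) (hl : pvHeader l = false) (p : List String)
    (st : String × String × List String) :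
    pvParaStep st (l :: p) = pvParaStep (st.1, pvFix st.2.1 l, st.2.2) p := by
  unfold pvParaStep
  rw [List.findIdx?_cons, hl]
  simp only [Bool.false_eq_true, if_false]
  cases hf : List.findIdx? pvHeader p with
  | none => simp [List.foldl_cons]
  | some h => simp [List.take_succ_cons, List.drop_succ_cons, List.foldl_cons]

-- projection of A's fold state discarding the within_changelog flag: (component, task_nr, result)
def pvG (st : List String × String × Bool × String) : String × String × List String :=
  (st.2.1, st.2.2.2, st.1)

-- main simulation: A's flag-machine fold equals B's fold over the paragraph split,
-- stated simultaneously for the flag-off mode (M) and the flag-on mode (W)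
theorem pvMain : ∀ (ms : List String),
    (∀ (res : List String) (comp task : String),
      pvG (List.foldl aStep (res, comp, false, task) ms)
        = List.foldl pvParaStep (comp, task, res) (pvParas ms)) ∧
    (∀ (res : List String) (comp task : String),
      pvG (List.foldl aStep (res, comp, true, task) ms)
        = List.foldl pvParaStep
            (comp, task, res ++ ((pvParas ms).headD []).map pvContLine) ((pvParas ms).tail)) := by
  intro ms
  induction ms with
  | nil =>
    constructor <;> intro res comp task <;>
      simp [pvParas, pvG, pvParaStep, List.findIdx?_nil]
  | cons l ls ih =>
    obtain ⟨ihM, ihW⟩ := ih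
    by_cases hl : l = ""
    · subst hl
      have hs1 : PySem.Str.startswith "" "[ChangeLog]" = false := by decide
      have hs2 : (PySem.Str.startswith "" "Fixes: " || PySem.Str.startswith "" "Task-number: ")
          = false := by decide
      constructor <;> intro res comp task
      · rw [List.foldl_cons,
          show aStep (res, comp, false, task) "" = (res, comp, false, task) from by
            simp only [aStep]; rw [hs1, hs2]; simp,
          ihM]
        simp [pvParas, pvParaStep_nil]
      · rw [List.foldl_cons,
          show aStep (res, comp, true, task) "" = (res, comp, false, task) from by
            simp [aStep],
          ihM]
        simp [pvParas]
    · obtain ⟨p, ps, hps⟩ : ∃ p ps, pvParas ls = p :: ps := by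
        cases h : pvParas ls with
        | nil => exact absurd h (pvParas_ne_nil ls)
        | cons a b => exact ⟨a, b, rfl⟩
      have hpl : pvParas (l :: ls) = (l :: p) :: ps := by
        simp [pvParas, hl, hps, pvConsHead]
      constructor <;> intro res comp task
      · cases hdr : pvHeader l with
        | true =>
          have hStr : PySem.Str.startswith l "[ChangeLog]" = true := hdr
          rw [List.foldl_cons,
            show aStep (res, comp, false, task) l
                = (res ++ [PySem.Str.strip (pvParseCL l comp).2], (pvParseCL l comp).1, true, task)
              from by simp only [aStep]; rw [hStr]; simp,
            ihW, hps, hpl]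
          have hb : pvParaStep (comp, task, res) (l :: p)
              = ((pvParseCL l comp).1, task,
                  res ++ [PySem.Str.strip (pvParseCL l comp).2] ++ p.map pvContLine) := by
            unfold pvParaStep
            rw [List.findIdx?_cons, hdr]
            simp
          rw [List.foldl_cons, hb]
          simp
        | false =>
          have hStr : PySem.Str.startswith l "[ChangeLog]" = false := hdr
          rw [hpl, List.foldl_cons, List.foldl_cons,
            pvParaStep_cons l hdr p (comp, task, res)]
          cases hfix : (PySem.Str.startswith l "Fixes: "
              || PySem.Str.startswith l "Task-number: ") with
          | true =>
            rw [show aStep (res, comp, false, task) l = (res, comp, false, pvTaskNr l) from by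
                simp only [aStep]; rw [hStr, hfix]; simp,
              ihM, hps]
            have : pvFix task l = pvTaskNr l := by
              simp only [pvFix]; rw [hfix]; simp
            rw [this, ← List.foldl_cons]
          | false =>
            rw [show aStep (res, comp, false, task) l = (res, comp, false, task) from by
                simp only [aStep]; rw [hStr, hfix]; simp,
              ihM, hps]
            have : pvFix task l = task := by
              simp only [pvFix]; rw [hfix]; simp
            rw [this, ← List.foldl_cons]
      · rw [List.foldl_cons,
          show aStep (res, comp, true, task) l = (res ++ [pvContLine l], comp, true, task) from by
            simp [aStep, hl],
          ihW, hps, hpl]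
        simp [List.append_assoc]

-- ===== VERDICT (by name: the statement is the Claim_ definition above) =====
theorem extract_change_log_spec : Claim_equal_extract_change_log := by
  intro commit_message _
  unfold Spec_extract_change_log extract_change_log extract_change_log_alt
  have hpar : (commit_message.foldl pvSplitStep ([], [])).1
      ++ [(commit_message.foldl pvSplitStep ([], [])).2] = pvParas commit_message := by
    rw [pvSplit_acc, pvConsHead_nil]
    simp
  have h := (pvMain commit_message).1 [] "pyside" ""
  rcases hfold : commit_message.foldl aStep ([], "pyside", false, "") with ⟨r, c, w, t⟩
  rw [hfold] at h
  rcases hloop : List.foldl pvParaStep ("pyside", "", []) (pvParas commit_message) with ⟨c', t', r'⟩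
  rw [hloop] at h
  simp only [pvG] at h
  obtain ⟨hc, ht, hrr⟩ : c = c' ∧ t = t' ∧ r = r' := by
    simpa [Prod.ext_iff] using h
  subst hc; subst ht; subst hrr
  simp only [hpar, hloop]
  cases r with
  | nil => simp
  | cons r0 rt =>
    by_cases htnr : t = ""
    · simp [htnr, List.set]
    · simp [htnr, List.set]
      rw [show (" - [" : String) = " - " ++ "[" from rfl]
      simp only [String.append_assoc]
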